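-- pv_equiv track=rewrite | github.com/hyomin777/Algorithm | 프로그래머스/0/120896. 한 번만 등장한 문자/한 번만 등장한 문자.py | solution
-- ===== SOURCE A (Python) =====
-- def solution(s):
--     exist = set()
--     seen = []
--
--     answer = ''
--     for char in s:
--         if char not in exist:
--             exist.add(char)
--         else:
--             seen.append(char)
--
--     for char in sorted(exist):
--         if char not in seen:
--             answer += char
--
--     return answer
-- ===== SOURCE B (Python) =====
-- def solution(s):
--     t = sorted(s)
--     out = []
--     i, n = 0, len(t)
--     while i < n:
--         j = i + 1
--         while j < n and t[j] == t[i]: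
--             j += 1
--         if j == i + 1:
--             out.append(t[i])
--         i = j
--     return ''.join(out)
-- ===== Notes on version B (the rewrite author's own statement) =====
-- stated objective: alternative
-- what changed: Instead of A's set/seen-list bookkeeping followed by a membership-filtered pass over the sorted set, B sorts the characters once and scans consecutive runs, emitting a character exactly when its run has length 1.
import Mathlib
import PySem

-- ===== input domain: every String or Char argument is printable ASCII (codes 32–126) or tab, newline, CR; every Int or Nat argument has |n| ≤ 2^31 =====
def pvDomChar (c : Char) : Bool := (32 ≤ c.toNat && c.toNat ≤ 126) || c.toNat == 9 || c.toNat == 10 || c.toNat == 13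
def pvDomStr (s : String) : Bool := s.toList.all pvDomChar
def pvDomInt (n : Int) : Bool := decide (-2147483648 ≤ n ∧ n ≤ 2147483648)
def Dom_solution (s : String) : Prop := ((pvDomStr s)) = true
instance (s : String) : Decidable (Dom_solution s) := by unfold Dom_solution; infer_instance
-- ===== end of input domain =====

-- B sorts the characters once and scans consecutive runs (emitting runs of length 1) instead of A's set/seen bookkeeping; alternative decomposition, same return value.

-- ===== PORT A =====
def solution (s : String) : String :=
  -- exist = set(); seen = []; for char in s: if char not in exist: exist.add(char) else: seen.append(char)
  let st := s.toList.foldl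
    (fun (st : PySem.Set Char × List Char) c =>
      if PySem.Set.contains st.1 c = false then (PySem.Set.add st.1 c, st.2)
      else (st.1, st.2 ++ [c]))
    (PySem.Set.empty, [])
  -- answer = ''; for char in sorted(exist): if char not in seen: answer += char
  let answer := (PySem.List.sorted st.1 (fun x => x) false).foldl
    (fun (acc : List Char) c => if c ∉ st.2 then acc ++ [c] else acc) []
  String.ofList answer

-- ===== PORT B =====
-- the inner while loop is one maximal run of the head character; the outer while loop is the recursion on the rest
def scanRuns : List Char → List Char
  | [] => []
  | c :: rest =>
    (if rest.takeWhile (· == c) = [] then [c] else []) ++ scanRuns (rest.dropWhile (· == c))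
termination_by t => t.length
decreasing_by
  simp only [List.length_cons]
  exact Nat.lt_succ_of_le (List.dropWhile_sublist _).length_le

def solution_alt (s : String) : String :=
  String.ofList (scanRuns (PySem.List.sorted s.toList (fun x => x) false))

-- ===== PRECONDITION & SPEC =====
def Spec_solution (s : String) (out : String) : Prop := out = solution_alt s
instance (s : String) (out : String) : Decidable (Spec_solution s out) := by unfold Spec_solution; infer_instance

-- ===== CLAIM (what is proved, stated in full; the proofs are below) =====
def Claim_equal_solution : Prop := ∀ (s : String), Dom_solution s → Spec_solution s (solution s)

-- ===== LEMMAS AND PROOFS =====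

-- the first component of A's loop state is just repeated Set.add
lemma loopA_fst (l : List Char) (e : PySem.Set Char) (sn : List Char) :
    (l.foldl (fun (st : PySem.Set Char × List Char) c =>
      if PySem.Set.contains st.1 c = false then (PySem.Set.add st.1 c, st.2)
      else (st.1, st.2 ++ [c])) (e, sn)).1 = l.foldl PySem.Set.add e := by
  induction l generalizing e sn with
  | nil => rfl
  | cons c l ih =>
    rw [List.foldl_cons, List.foldl_cons]
    cases hcb : PySem.Set.contains e c with
    | false =>
      rw [if_pos rfl]
      exact ih _ _
    | true =>
      have hce : c ∈ e := (PySem.Set.contains_iff e c).mp hcb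
      have hadd : PySem.Set.add e c = e := by simp [PySem.Set.add, hce]
      rw [if_neg (by simp), ih, hadd]


-- membership in A's seen list after the loop
lemma loopA_snd (l : List Char) (e : PySem.Set Char) (sn : List Char) (x : Char) :
    x ∈ (l.foldl (fun (st : PySem.Set Char × List Char) c =>
      if PySem.Set.contains st.1 c = false then (PySem.Set.add st.1 c, st.2)
      else (st.1, st.2 ++ [c])) (e, sn)).2 ↔
    x ∈ sn ∨ (x ∈ e ∧ x ∈ l) ∨ (x ∉ e ∧ 2 ≤ l.count x) := by
  induction l generalizing e sn with
  | nil => simp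
  | cons c l ih =>
    rw [List.foldl_cons]
    cases hcb : PySem.Set.contains e c with
    | false =>
      have hce : c ∉ e := fun hm => by
        rw [(PySem.Set.contains_iff e c).mpr hm] at hcb; cases hcb
      rw [if_pos rfl, ih]
      have hma : x ∈ PySem.Set.add e c ↔ x ∈ e ∨ x = c := PySem.Set.mem_add e c x
      by_cases hxc : x = c
      · have hcnt : (c :: l).count x = l.count x + 1 := by
          rw [hxc]; exact List.count_cons_self ..
        rw [hcnt]
        have hxe : x ∉ e := hxc ▸ hce
        have hmal : x ∈ PySem.Set.add e c := hma.mpr (Or.inr hxc)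
        constructor
        · rintro (h1 | ⟨_, h2⟩ | ⟨h3, _⟩)
          · exact Or.inl h1
          · refine Or.inr (Or.inr ⟨hxe, ?_⟩)
            have := List.count_pos_iff.mpr h2
            omega
          · exact absurd hmal h3
        · rintro (h1 | ⟨h2, _⟩ | ⟨_, h3⟩)
          · exact Or.inl h1
          · exact absurd h2 hxe
          · have hl : x ∈ l := List.count_pos_iff.mp (by omega)
            exact Or.inr (Or.inl ⟨hmal, hl⟩)
      · have hcnt : (c :: l).count x = l.count x := by
          rw [List.count_cons, beq_eq_false_iff_ne.mpr (fun hcx => hxc hcx.symm)]; simp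
        have hmal : x ∈ PySem.Set.add e c ↔ x ∈ e := by rw [hma]; simp [hxc]
        have hmc : x ∈ c :: l ↔ x ∈ l := by simp [List.mem_cons, hxc]
        rw [hcnt, hmal, hmc]
    | true =>
      have hce : c ∈ e := (PySem.Set.contains_iff e c).mp hcb
      rw [if_neg (by simp), ih]
      by_cases hxc : x = c
      · have hcnt : (c :: l).count x = l.count x + 1 := by
          rw [hxc]; exact List.count_cons_self ..
        rw [hcnt]
        have hxe : x ∈ e := hxc ▸ hce
        constructor
        · rintro (h1 | ⟨h2, h3⟩ | ⟨h4, _⟩)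
          · rcases List.mem_append.mp h1 with h1 | h1
            · exact Or.inl h1
            · exact Or.inr (Or.inl ⟨hxe, List.mem_cons.mpr (Or.inl hxc)⟩)
          · exact Or.inr (Or.inl ⟨h2, List.mem_cons.mpr (Or.inr h3)⟩)
          · exact absurd hxe h4
        · rintro (h1 | ⟨h2, h3⟩ | ⟨h4, _⟩)
          · exact Or.inl (List.mem_append.mpr (Or.inl h1))
          · exact Or.inl (List.mem_append.mpr (Or.inr (by simp [hxc])))
          · exact absurd hxe h4
      · have hcnt : (c :: l).count x = l.count x := by
          rw [List.count_cons, beq_eq_false_iff_ne.mpr (fun hcx => hxc hcx.symm)]; simp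
        have hsnc : x ∈ sn ++ [c] ↔ x ∈ sn := by simp [List.mem_append, hxc]
        have hmc : x ∈ c :: l ↔ x ∈ l := by simp [List.mem_cons, hxc]
        rw [hcnt, hsnc, hmc]


-- structural facts about one step of scanRuns on a (≤)-sorted list
lemma run_facts (c : Char) (rest : List Char) (h : (c :: rest).Pairwise (· ≤ ·)) :
    (∀ x ∈ rest.takeWhile (· == c), x = c) ∧ (∀ x ∈ rest.dropWhile (· == c), c < x) := by
  have hc : ∀ x ∈ rest, c ≤ x := (List.pairwise_cons.mp h).1
  have hrun : ∀ x ∈ rest.takeWhile (· == c), x = c := by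
    intro x hx
    have hp := List.mem_takeWhile_imp (p := fun y => y == c) (l := rest) hx
    exact eq_of_beq hp
  refine ⟨hrun, ?_⟩
  have hrest : rest.Pairwise (· ≤ ·) := (List.pairwise_cons.mp h).2
  have hsub : (rest.dropWhile (· == c)).Sublist rest := List.dropWhile_sublist _
  cases hd : rest.dropWhile (· == c) with
  | nil => simp
  | cons f r =>
    have hlen : 0 < (rest.dropWhile (· == c)).length := by rw [hd]; simp
    have hf : ¬ ((rest.dropWhile (· == c)).get ⟨0, hlen⟩ == c) = true :=
      List.dropWhile_get_zero_not _ _ hlen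
    have hfc : f ≠ c := by
      intro hfc; apply hf; simp [hd, hfc]
    have hfmem : f ∈ rest := hsub.mem (by simp [hd])
    have hcf : c < f := lt_of_le_of_ne (hc f hfmem) (Ne.symm hfc)
    have hpw : (f :: r).Pairwise (· ≤ ·) := hd ▸ hrest.sublist hsub
    intro x hx
    rcases List.mem_cons.mp hx with rfl | hx
    · exact hcf
    · exact lt_of_lt_of_le hcf ((List.pairwise_cons.mp hpw).1 x hx)

lemma mem_scanRuns (t : List Char) (h : t.Pairwise (· ≤ ·)) (x : Char) :
    x ∈ scanRuns t ↔ x ∈ t ∧ t.count x = 1 := by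
  induction t using scanRuns.induct with
  | case1 => simp [scanRuns]
  | case2 c rest ih =>
    obtain ⟨hrun, hgt⟩ := run_facts c rest h
    have hrest' : (rest.dropWhile (· == c)).Pairwise (· ≤ ·) :=
      (List.pairwise_cons.mp h).2.sublist (List.dropWhile_sublist _)
    have hsplit : rest.takeWhile (· == c) ++ rest.dropWhile (· == c) = rest :=
      List.takeWhile_append_dropWhile
    have hcnt2 : rest.count x
        = (rest.takeWhile (· == c)).count x + (rest.dropWhile (· == c)).count x := by
      conv_lhs => rw [← hsplit]
      exact List.count_append ..
    rw [scanRuns, List.mem_append, ih hrest']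
    by_cases hx : x = c
    · subst hx
      have hnr : x ∉ rest.dropWhile (· == x) := fun hm => absurd (hgt x hm) (lt_irrefl x)
      have hrc : (rest.takeWhile (· == x)).count x = (rest.takeWhile (· == x)).length :=
        List.count_eq_length.mpr (fun b hb => by simp [hrun b hb])
      have hr0 : (rest.dropWhile (· == x)).count x = 0 := List.count_eq_zero.mpr hnr
      have hcc : (x :: rest).count x = rest.count x + 1 := List.count_cons_self ..
      constructor
      · rintro (hin | ⟨hm, _⟩)
        · have hr : rest.takeWhile (· == x) = [] := by
            by_contra hne; rw [if_neg hne] at hin; simp at hin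
          refine ⟨List.mem_cons_self, ?_⟩
          rw [hcc, hcnt2, hrc, hr0, hr]
          simp
        · exact absurd hm hnr
      · rintro ⟨_, hcount1⟩
        left
        have hlen0 : (rest.takeWhile (· == x)).length = 0 := by
          rw [hcc, hcnt2, hrc, hr0] at hcount1; omega
        rw [List.length_eq_zero_iff] at hlen0
        rw [if_pos hlen0]
        simp
    · have hnr : x ∉ rest.takeWhile (· == c) := fun hm => hx (hrun x hm)
      have hr0 : (rest.takeWhile (· == c)).count x = 0 := List.count_eq_zero.mpr hnr
      have hbcx : (c == x) = false := beq_eq_false_iff_ne.mpr (fun hcx => hx hcx.symm)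
      have hite : x ∉ (if rest.takeWhile (· == c) = [] then [c] else ([] : List Char)) := by
        split <;> simp [hx]
      have hmm : x ∈ c :: rest ↔ x ∈ rest.dropWhile (· == c) := by
        rw [List.mem_cons]
        constructor
        · rintro (rfl | hm)
          · exact absurd rfl hx
          · rw [← hsplit] at hm
            rcases List.mem_append.mp hm with hm | hm
            · exact absurd hm hnr
            · exact hm
        · intro hm
          exact Or.inr ((List.dropWhile_sublist _).subset hm)
      have hceq : (c :: rest).count x = (rest.dropWhile (· == c)).count x := by
        rw [List.count_cons, hbcx, hcnt2, hr0]
        simp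
      rw [hceq, hmm]
      exact ⟨fun h' => h'.resolve_left (fun hin => hite hin), fun h2 => Or.inr h2⟩

lemma pairwise_scanRuns (t : List Char) (h : t.Pairwise (· ≤ ·)) :
    (scanRuns t).Pairwise (· < ·) := by
  induction t using scanRuns.induct with
  | case1 => simp [scanRuns]
  | case2 c rest ih =>
    obtain ⟨_, hgt⟩ := run_facts c rest h
    have hrest' : (rest.dropWhile (· == c)).Pairwise (· ≤ ·) :=
      (List.pairwise_cons.mp h).2.sublist (List.dropWhile_sublist _)
    rw [scanRuns]
    apply List.pairwise_append.mpr
    refine ⟨?_, ih hrest', ?_⟩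
    · split <;> simp
    · intro a ha b hb
      have hbmem : b ∈ rest.dropWhile (· == c) :=
        ((mem_scanRuns _ hrest' b).mp hb).1
      have hac : a = c := by revert ha; split <;> simp_all
      exact hac ▸ hgt b hbmem

-- two strictly increasing lists with the same members are equal
lemma strict_sorted_ext (l₁ l₂ : List Char) (h₁ : l₁.Pairwise (· < ·))
    (h₂ : l₂.Pairwise (· < ·)) (hmem : ∀ x, x ∈ l₁ ↔ x ∈ l₂) : l₁ = l₂ := by
  have hn₁ : l₁.Nodup := h₁.imp ne_of_lt
  have hn₂ : l₂.Nodup := h₂.imp ne_of_lt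
  have hperm : l₁.Perm l₂ := (List.perm_ext_iff_of_nodup hn₁ hn₂).mpr hmem
  exact List.eq_of_perm_of_sorted (le := (· < ·))
    (fun a b _ _ hab hba => absurd hba (lt_asymm hab)) h₁ h₂ hperm

-- ===== VERDICT (by name: the statement is the Claim_ definition above) =====
theorem solution_spec : Claim_equal_solution := by
  intro s _
  unfold Spec_solution solution solution_alt
  simp only []
  apply congrArg String.ofList
  rw [loopA_fst]
  have hofl : s.toList.foldl PySem.Set.add PySem.Set.empty = PySem.Set.ofList s.toList :=
    (PySem.Set.ofList_eq_foldl s.toList).symm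
  rw [hofl]
  set seen := (s.toList.foldl
    (fun (st : PySem.Set Char × List Char) c =>
      if PySem.Set.contains st.1 c = false then (PySem.Set.add st.1 c, st.2)
      else (st.1, st.2 ++ [c])) (PySem.Set.empty, [])).2 with hseen
  have hA : (PySem.List.sorted (PySem.Set.ofList s.toList) (fun x => x) false).foldl
      (fun (acc : List Char) c => if c ∉ seen then acc ++ [c] else acc) []
      = (PySem.List.sorted (PySem.Set.ofList s.toList) (fun x => x) false).filter
          (fun c => decide (c ∉ seen)) := by
    have := PySem.List.foldl_append_if (p := fun c => decide (c ∉ seen)) (f := fun c => c)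
      (PySem.List.sorted (PySem.Set.ofList s.toList) (fun x => x) false) []
    simpa using this
  rw [hA]
  have hseenmem : ∀ x, x ∈ seen ↔ 2 ≤ s.toList.count x := by
    intro x
    rw [hseen, loopA_snd]
    simp [PySem.Set.empty]
  have hTs : (PySem.List.sorted s.toList (fun x => x) false).Pairwise (· ≤ ·) :=
    PySem.List.sorted_pairwise s.toList (fun x => x)
  apply strict_sorted_ext
  · exact (PySem.List.sorted_ofList_pairwise_lt s.toList).filter _
  · exact pairwise_scanRuns _ hTs
  · intro x
    rw [List.mem_filter, mem_scanRuns _ hTs]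
    have hcnt : (PySem.List.sorted s.toList (fun x => x) false).count x = s.toList.count x :=
      (PySem.List.sorted_perm s.toList (fun x => x) false).count_eq x
    rw [PySem.List.mem_sorted, PySem.List.mem_sorted, PySem.Set.mem_ofList, hcnt]
    simp only [decide_eq_true_eq, hseenmem]
    constructor
    · rintro ⟨hm, hc⟩
      have h1 : 1 ≤ s.toList.count x := List.one_le_count_iff.mpr hm
      exact ⟨hm, by omega⟩
    · rintro ⟨hm, hc⟩
      exact ⟨hm, by omega⟩
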